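-- pv_equiv track=rewrite | github.com/jchy20/how-much-backtrack | reasoning-gym/reasoning_gym/arc/arc_1d_tasks.py | transform_copy_block_to_dots_colors
-- ===== SOURCE A (Python) =====
-- def transform_copy_block_to_dots_colors(input_grid: list[int]) -> list[int]:
--     size = len(input_grid)
--     # 1. Determine the initial block size and color at the left
--     block_color = input_grid[0]
--     block_size = 1
--     while block_size < size and input_grid[block_size] == block_color:
--         block_size += 1
--
--     # 2. Find dot positions and their colors (non-zero outside the initial block)
--     dot_positions = []
--     dot_colors = []
--     for i in range(block_size, size):
--         v = input_grid[i]
--         if v != 0: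
--             dot_positions.append(i)
--             dot_colors.append(v)
--
--     # 3. Build the output grid
--     output = [0] * size
--
--     # 3a. Copy the original block at index 0
--     for i in range(block_size):
--         output[i] = block_color
--
--     # 3b. For each dot, copy a block of its color centered at that dot
--     half = block_size // 2
--     for pos, color in zip(dot_positions, dot_colors):
--         start = pos - half
--         for j in range(block_size):
--             idx = start + j
--             if 0 <= idx < size:
--                 output[idx] = color
--
--     return output
-- ===== SOURCE B (Python) =====
-- def transform_copy_block_to_dots_colors(input_grid: list[int]) -> list[int]:
--     size = len(input_grid)
--     block_color = input_grid[0]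
--     block_size = 1
--     while block_size < size and input_grid[block_size] == block_color:
--         block_size += 1
--     half = block_size // 2
--     dots = [(i, input_grid[i]) for i in range(block_size, size) if input_grid[i] != 0]
--
--     # Gather instead of scatter: each output cell is computed once, as the color of
--     # the last dot whose window covers it, falling back to the base grid.
--     def cell(i):
--         color = block_color if i < block_size else 0
--         for pos, v in dots:
--             if pos - half <= i < pos - half + block_size:
--                 color = v
--         return color
--
--     return [cell(i) for i in range(size)]
-- ===== Notes on version B (the rewrite author's own statement) =====
-- stated objective: alternative
-- what changed: A scatter-paints: it allocates an output array and overwrites a window of it for each dot (later dots overwrite earlier ones); B gather-computes: each output cell is produced once, as the color of the last dot whose window covers it, falling back to the block prefix / zero base.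
-- outside the precondition, e.g. on transform_copy_block_to_dots_colors([]): A raises IndexError, B raises IndexError
import Mathlib
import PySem

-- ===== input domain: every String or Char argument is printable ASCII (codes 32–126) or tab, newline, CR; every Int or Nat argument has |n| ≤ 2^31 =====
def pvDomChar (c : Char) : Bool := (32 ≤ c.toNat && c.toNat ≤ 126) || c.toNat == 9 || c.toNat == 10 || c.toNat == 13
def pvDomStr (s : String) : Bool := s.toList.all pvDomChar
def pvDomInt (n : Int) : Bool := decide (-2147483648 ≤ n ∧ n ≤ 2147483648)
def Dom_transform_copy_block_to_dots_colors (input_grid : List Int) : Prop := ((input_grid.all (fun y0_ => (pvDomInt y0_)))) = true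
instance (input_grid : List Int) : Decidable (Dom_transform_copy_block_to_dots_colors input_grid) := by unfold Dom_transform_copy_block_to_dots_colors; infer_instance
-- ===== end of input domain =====

-- B replaces A's scatter-style painting (each dot overwriting a window of the output array)
-- by a gather-style computation: each output cell is computed once as the color of the last
-- dot whose window covers it (objective: alternative; return value only, no mutation involved).

-- ===== PORT A =====
-- the `while block_size < size and input_grid[block_size] == block_color` loop of A (and B)
def pvBlockSize (g : List Int) (c : Int) (bs : Nat) : Nat :=
  if bs < g.length ∧ PySem.List.pyGetD g (bs : Int) 0 = c then
    pvBlockSize g c (bs + 1)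
  else bs
termination_by g.length - bs
decreasing_by omega

def transform_copy_block_to_dots_colors (input_grid : List Int) : List Int :=
  let size : Nat := input_grid.length
  let block_color : Int := PySem.List.pyGetD input_grid 0 0  -- input_grid[0]; Pre_ excludes []
  let bs : Nat := pvBlockSize input_grid block_color 1
  -- dot_positions / dot_colors collected together as pairs (A zips them later)
  let dots : List (Int × Int) :=
    (PySem.List.pyRange (bs : Int) (size : Int)).foldl
      (fun acc i =>
        let v := PySem.List.pyGetD input_grid i 0
        if v ≠ 0 then acc ++ [(i, v)] else acc) []
  let out0 : List Int := List.replicate size 0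
  let out1 : List Int :=
    (PySem.List.pyRange 0 (bs : Int)).foldl
      (fun o i => PySem.List.pySetD o i block_color) out0
  let half : Int := PySem.Int.floordiv (bs : Int) 2
  dots.foldl
    (fun o pc =>
      let start := pc.1 - half
      (PySem.List.pyRange 0 (bs : Int)).foldl
        (fun o2 j =>
          let idx := start + j
          if 0 ≤ idx ∧ idx < (size : Int) then PySem.List.pySetD o2 idx pc.2 else o2) o)
    out1

-- ===== PORT B =====
-- B's `cell(i)`: last dot whose window covers i, else the base grid (block prefix, zeros)
def pvCell (bs : Nat) (c half : Int) (dots : List (Int × Int)) (i : Int) : Int :=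
  dots.foldl
    (fun color pv => if pv.1 - half ≤ i ∧ i < pv.1 - half + (bs : Int) then pv.2 else color)
    (if i < (bs : Int) then c else 0)

def transform_copy_block_to_dots_colors_alt (input_grid : List Int) : List Int :=
  let size : Nat := input_grid.length
  let block_color : Int := PySem.List.pyGetD input_grid 0 0
  let bs : Nat := pvBlockSize input_grid block_color 1
  let half : Int := PySem.Int.floordiv (bs : Int) 2
  let dots : List (Int × Int) :=
    ((PySem.List.pyRange (bs : Int) (size : Int)).filter
        (fun i => PySem.List.pyGetD input_grid i 0 ≠ 0)).map
      (fun i => (i, PySem.List.pyGetD input_grid i 0))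
  (PySem.List.pyRange 0 (size : Int)).map (pvCell bs block_color half dots)

-- ===== PRECONDITION & SPEC =====
-- Pre_ excludes only the empty list, on which A raises IndexError at input_grid[0].
def Pre_transform_copy_block_to_dots_colors (input_grid : List Int) : Prop := input_grid ≠ []
instance (input_grid : List Int) : Decidable (Pre_transform_copy_block_to_dots_colors input_grid) := by unfold Pre_transform_copy_block_to_dots_colors; infer_instance
def pvWitness_transform_copy_block_to_dots_colors : List Int := [2, 2, 2, 0, 0, 5, 0, 0, 3, 0]

def Spec_transform_copy_block_to_dots_colors (input_grid : List Int) (out : List Int) : Prop := out = transform_copy_block_to_dots_colors_alt input_grid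
instance (input_grid : List Int) (out : List Int) : Decidable (Spec_transform_copy_block_to_dots_colors input_grid out) := by unfold Spec_transform_copy_block_to_dots_colors; infer_instance

-- ===== CLAIM (what is proved, stated in full; the proofs are below) =====
def Claim_equal_transform_copy_block_to_dots_colors : Prop := ∀ (input_grid : List Int), Dom_transform_copy_block_to_dots_colors input_grid → Pre_transform_copy_block_to_dots_colors input_grid → Spec_transform_copy_block_to_dots_colors input_grid (transform_copy_block_to_dots_colors input_grid)

-- ===== LEMMAS AND PROOFS =====

-- length is preserved by any foldl whose step is a pySetD
theorem pvLenFoldSet {β : Type} (f : List Int → β → Int × Int) (l : List β) (o : List Int) :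
    (l.foldl (fun o x => PySem.List.pySetD o (f o x).1 (f o x).2) o).length = o.length := by
  induction l generalizing o with
  | nil => rfl
  | cons x xs ih => simp [List.foldl_cons, ih, PySem.List.length_pySetD]

-- pointwise value of the block-painting loop (3a)
theorem pvOut1 (c : Int) (b : Nat) (o : List Int) (hb : b ≤ o.length) (k : Nat) :
    PySem.List.pyGetD ((PySem.List.pyRange 0 (b : Int)).foldl
        (fun o i => PySem.List.pySetD o i c) o) (k : Int) 0
      = if k < b then c else PySem.List.pyGetD o (k : Int) 0 := by
  induction b with
  | zero => simp [PySem.List.pyRange_one_eq_nil]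
  | succ n ih =>
    have h1 : ((n : Int) : Int) ≥ 0 := by positivity
    rw [show ((n + 1 : Nat) : Int) = (n : Int) + 1 by push_cast; ring,
        PySem.List.pyRange_one_succ_right (by positivity),
        List.foldl_append]
    simp only [List.foldl_cons, List.foldl_nil]
    have hlen : ((PySem.List.pyRange 0 (n : Int)).foldl
        (fun o i => PySem.List.pySetD o i c) o).length = o.length := by
      have := pvLenFoldSet (fun (o : List Int) (i : Int) => (i, c))
        (PySem.List.pyRange 0 (n : Int)) o
      simpa using this
    rw [PySem.List.pyGetD_pySetD_natCast _ n k _ _ (by omega), ih (by omega)]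
    split_ifs <;> first | rfl | omega

-- length preservation for one dot's painting loop
theorem pvPaintLen (color start : Int) (b size : Nat) (o : List Int) :
    ((PySem.List.pyRange 0 (b : Int)).foldl
        (fun o2 j => if 0 ≤ start + j ∧ start + j < (size : Int)
                     then PySem.List.pySetD o2 (start + j) color else o2) o).length = o.length := by
  induction (PySem.List.pyRange 0 (b : Int)) generalizing o with
  | nil => rfl
  | cons x xs ihl =>
    simp only [List.foldl_cons]
    rw [ihl]
    split <;> simp [PySem.List.length_pySetD]

-- pointwise value of one dot's painting loop (3b inner)
theorem pvPaint (color start : Int) (b size : Nat) (o : List Int) (ho : o.length = size) (k : Nat) (hk : k < size) :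
    PySem.List.pyGetD ((PySem.List.pyRange 0 (b : Int)).foldl
        (fun o2 j => if 0 ≤ start + j ∧ start + j < (size : Int)
                     then PySem.List.pySetD o2 (start + j) color else o2) o) (k : Int) 0
      = if start ≤ (k : Int) ∧ (k : Int) < start + b then color
        else PySem.List.pyGetD o (k : Int) 0 := by
  induction b generalizing o with
  | zero =>
    simp [PySem.List.pyRange_one_eq_nil]
  | succ n ih =>
    rw [show ((n + 1 : Nat) : Int) = (n : Int) + 1 by push_cast; ring,
        PySem.List.pyRange_one_succ_right (by positivity),
        List.foldl_append]
    simp only [List.foldl_cons, List.foldl_nil]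
    have hlen := pvPaintLen color start n size o
    by_cases hg : 0 ≤ start + n ∧ start + (n : Int) < (size : Int)
    · rw [if_pos hg]
      obtain ⟨hg0, hg1⟩ := hg
      have hcast : start + (n : Int) = ((start + n).toNat : Int) := by omega
      rw [hcast, PySem.List.pyGetD_pySetD_natCast _ _ k _ _ (by omega), ih o ho]
      split_ifs <;> first | rfl | omega
    · rw [if_neg hg, ih o ho]
      split_ifs <;> first | rfl | omega

-- pointwise value of the whole dot loop = B's last-covering-dot fold
theorem pvDots (bs size : Nat) (half : Int) (dots : List (Int × Int)) (o : List Int)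
    (ho : o.length = size) (k : Nat) (hk : k < size) :
    PySem.List.pyGetD (dots.foldl
        (fun o pc =>
          let start := pc.1 - half
          (PySem.List.pyRange 0 (bs : Int)).foldl
            (fun o2 j =>
              let idx := start + j
              if 0 ≤ idx ∧ idx < (size : Int) then PySem.List.pySetD o2 idx pc.2 else o2) o) o)
        (k : Int) 0
      = dots.foldl
          (fun color pv => if pv.1 - half ≤ (k : Int) ∧ (k : Int) < pv.1 - half + (bs : Int)
                           then pv.2 else color)
          (PySem.List.pyGetD o (k : Int) 0) := by
  induction dots generalizing o with
  | nil => rfl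
  | cons pc rest ih =>
    simp only [List.foldl_cons]
    rw [ih _ (by rw [pvPaintLen]; exact ho), pvPaint pc.2 (pc.1 - half) bs size o ho k hk]

-- A's dot-collecting loop builds exactly B's filtered/mapped dot list
theorem pvDotsEq (g : List Int) (bs size : Nat) :
    (PySem.List.pyRange (bs : Int) (size : Int)).foldl
      (fun acc i =>
        let v := PySem.List.pyGetD g i 0
        if v ≠ 0 then acc ++ [(i, v)] else acc) ([] : List (Int × Int))
    = ((PySem.List.pyRange (bs : Int) (size : Int)).filter
          (fun i => PySem.List.pyGetD g i 0 ≠ 0)).map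
        (fun i => (i, PySem.List.pyGetD g i 0)) := by
  simpa using PySem.List.foldl_append_if
    (fun i : Int => decide (PySem.List.pyGetD g i 0 ≠ 0))
    (fun i : Int => (i, PySem.List.pyGetD g i 0))
    (PySem.List.pyRange (bs : Int) (size : Int)) []

-- the whole dot loop preserves length
theorem pvDotsLen (bs size : Nat) (half : Int) (dots : List (Int × Int)) (o : List Int) :
    ((dots.foldl
        (fun o pc =>
          let start := pc.1 - half
          (PySem.List.pyRange 0 (bs : Int)).foldl
            (fun o2 j =>
              let idx := start + j
              if 0 ≤ idx ∧ idx < (size : Int) then PySem.List.pySetD o2 idx pc.2 else o2) o) o)).length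
      = o.length := by
  induction dots generalizing o with
  | nil => rfl
  | cons pc rest ih =>
    simp only [List.foldl_cons]
    rw [ih]
    simpa using pvPaintLen pc.2 (pc.1 - half) bs size o

-- the initial while loop never passes the end of the grid
theorem pvBlockSize_le (g : List Int) (c : Int) (bs : Nat) (h : bs ≤ g.length) :
    pvBlockSize g c bs ≤ g.length := by
  unfold pvBlockSize
  split
  · exact pvBlockSize_le g c (bs + 1) (by omega)
  · exact h
termination_by g.length - bs
decreasing_by omega

-- getElem of an in-range Nat index as pyGetD
theorem pvGetElem (xs : List Int) (k : Nat) (h : k < xs.length) :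
    xs[k] = PySem.List.pyGetD xs (k : Int) 0 := by
  rw [PySem.List.pyGetD_eq_getElem xs 0 (by positivity) (by exact_mod_cast h)]
  simp

theorem pvMain (g : List Int) (hg : g ≠ []) :
    transform_copy_block_to_dots_colors g = transform_copy_block_to_dots_colors_alt g := by
  have h1 : 1 ≤ g.length := by cases g with | nil => simp at hg | cons x xs => simp
  have hbsle : pvBlockSize g (PySem.List.pyGetD g 0 0) 1 ≤ g.length :=
    pvBlockSize_le g _ 1 h1
  simp only [transform_copy_block_to_dots_colors, transform_copy_block_to_dots_colors_alt]
  rw [pvDotsEq g _ g.length]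
  have hout1len :
      ((PySem.List.pyRange 0 ((pvBlockSize g (PySem.List.pyGetD g 0 0) 1 : Nat) : Int)).foldl
        (fun o i => PySem.List.pySetD o i (PySem.List.pyGetD g 0 0))
        (List.replicate g.length 0)).length = g.length := by
    have := pvLenFoldSet (fun (o : List Int) (i : Int) => (i, PySem.List.pyGetD g 0 0))
      (PySem.List.pyRange 0 ((pvBlockSize g (PySem.List.pyGetD g 0 0) 1 : Nat) : Int))
      (List.replicate g.length 0)
    simpa using this
  apply List.ext_getElem
  · rw [pvDotsLen, hout1len]
    simp [PySem.List.pyRange_zero_natCast]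
  · intro k hkA hkB
    have hk : k < g.length := by
      rw [pvDotsLen, hout1len] at hkA; exact hkA
    -- B side: the k-th mapped cell
    have hB : ((PySem.List.pyRange 0 ((g.length : Nat) : Int)).map
          (pvCell (pvBlockSize g (PySem.List.pyGetD g 0 0) 1) (PySem.List.pyGetD g 0 0)
            (PySem.Int.floordiv ((pvBlockSize g (PySem.List.pyGetD g 0 0) 1 : Nat) : Int) 2)
            (((PySem.List.pyRange ((pvBlockSize g (PySem.List.pyGetD g 0 0) 1 : Nat) : Int) (g.length : Int)).filter
                (fun i => PySem.List.pyGetD g i 0 ≠ 0)).map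
              (fun i => (i, PySem.List.pyGetD g i 0)))))[k]'hkB
        = pvCell (pvBlockSize g (PySem.List.pyGetD g 0 0) 1) (PySem.List.pyGetD g 0 0)
            (PySem.Int.floordiv ((pvBlockSize g (PySem.List.pyGetD g 0 0) 1 : Nat) : Int) 2)
            (((PySem.List.pyRange ((pvBlockSize g (PySem.List.pyGetD g 0 0) 1 : Nat) : Int) (g.length : Int)).filter
                (fun i => PySem.List.pyGetD g i 0 ≠ 0)).map
              (fun i => (i, PySem.List.pyGetD g i 0))) (k : Int) := by
      simp [PySem.List.pyRange_zero_natCast]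
    rw [hB]
    rw [pvGetElem _ k hkA]
    rw [pvDots _ g.length _ _ _ hout1len k hk]
    rw [pvOut1 (PySem.List.pyGetD g 0 0) _ _ (by simpa using hbsle) k]
    unfold pvCell
    congr 1
    have : PySem.List.pyGetD (List.replicate g.length (0 : Int)) (k : Int) 0 = 0 := by
      simp [PySem.List.pyGetD_natCast, List.getD]
    rw [this]
    by_cases h : k < pvBlockSize g (PySem.List.pyGetD g 0 0) 1 <;> simp [h]

-- ===== VERDICT (by name: the statement is the Claim_ definition above) =====
theorem transform_copy_block_to_dots_colors_spec : Claim_equal_transform_copy_block_to_dots_colors := by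
  intro g _ hpre
  exact pvMain g hpre
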